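-- pv_equiv track=rewrite | github.com/Oded2/Python-Hangman | main.py | getfinal
-- ===== SOURCE A (Python) =====
-- def getfinal(word, indexes, placeholder):
--     final_word = ""
--     for i in range(len(word)):
--         current = word[i]
--         if i in indexes:
--             final_word += current
--         else:
--             final_word += placeholder
--     return final_word
-- ===== SOURCE B (Python) =====
-- def getfinal(word, indexes, placeholder):
--     buf = [placeholder] * len(word)
--     for idx in indexes:
--         if 0 <= idx < len(word):
--             buf[idx] = word[idx]
--     return ''.join(buf)
-- ===== Notes on version B (the rewrite author's own statement) =====
-- stated objective: faster
-- what changed: Instead of scanning every position and testing 'i in indexes' (an inner linear scan), B allocates a buffer of placeholders and patches only the in-range revealed indexes, then joins once.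
import Mathlib
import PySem

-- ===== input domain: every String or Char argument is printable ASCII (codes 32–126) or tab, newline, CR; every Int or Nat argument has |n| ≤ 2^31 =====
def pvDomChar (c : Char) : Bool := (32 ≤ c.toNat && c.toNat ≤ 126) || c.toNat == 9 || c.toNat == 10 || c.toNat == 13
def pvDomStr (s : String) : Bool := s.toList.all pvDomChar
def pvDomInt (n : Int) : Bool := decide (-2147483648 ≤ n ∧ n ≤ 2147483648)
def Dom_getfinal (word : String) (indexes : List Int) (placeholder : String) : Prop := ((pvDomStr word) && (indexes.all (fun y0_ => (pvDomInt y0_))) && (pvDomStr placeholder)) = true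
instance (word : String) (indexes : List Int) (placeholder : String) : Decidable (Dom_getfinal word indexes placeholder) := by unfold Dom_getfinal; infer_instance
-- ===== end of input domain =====

-- B replaces A's per-position scan of `indexes` by a placeholder buffer patched at the
-- revealed in-range indexes (objective: faster — no inner membership scan).

-- ===== PORT A =====
-- for i in range(len(word)): append word[i] if i in indexes else placeholder
def getfinal (word : String) (indexes : List Int) (placeholder : String) : String :=
  String.mk ((List.range word.toList.length).foldl
    (fun fw i =>
      let current := word.toList.getD i ' '   -- word[i]; i < len(word) always holds here
      if (i : Int) ∈ indexes then fw ++ [current] else fw ++ placeholder.toList) [])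

-- ===== PORT B =====
-- buf[idx] = word[idx] when 0 <= idx < len(word)
def pvPatch (w : List Char) (b : List (List Char)) (idx : Int) : List (List Char) :=
  if 0 ≤ idx ∧ idx < (w.length : Int) then b.set idx.toNat [w.getD idx.toNat ' '] else b

def getfinal_alt (word : String) (indexes : List Int) (placeholder : String) : String :=
  String.mk ((indexes.foldl (pvPatch word.toList)
    (List.replicate word.toList.length placeholder.toList)).flatten)

-- ===== PRECONDITION & SPEC =====
def Spec_getfinal (word : String) (indexes : List Int) (placeholder : String) (out : String) : Prop := out = getfinal_alt word indexes placeholder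
instance (word : String) (indexes : List Int) (placeholder : String) (out : String) : Decidable (Spec_getfinal word indexes placeholder out) := by unfold Spec_getfinal; infer_instance

-- ===== CLAIM (what is proved, stated in full; the proofs are below) =====
def Claim_equal_getfinal : Prop := ∀ (word : String) (indexes : List Int) (placeholder : String), Dom_getfinal word indexes placeholder → Spec_getfinal word indexes placeholder (getfinal word indexes placeholder)

-- ===== LEMMAS AND PROOFS =====

-- the i-th piece of the output, as a list of chars
def pvPiece (w : List Char) (indexes : List Int) (p : List Char) (i : Nat) : List Char :=
  if (i : Int) ∈ indexes then [w.getD i ' '] else p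

-- A's fold appends piece after piece
theorem pvFoldA (w : List Char) (indexes : List Int) (p : List Char) :
    ∀ (l : List Nat) (acc : List Char),
      l.foldl (fun fw i =>
        let current := w.getD i ' '
        if (i : Int) ∈ indexes then fw ++ [current] else fw ++ p) acc
      = acc ++ (l.map (pvPiece w indexes p)).flatten := by
  intro l
  induction l with
  | nil => intro acc; simp
  | cons a t ih =>
    intro acc
    simp only [List.foldl_cons, List.map_cons, List.flatten_cons, ih]
    by_cases h : (a : Int) ∈ indexes <;> simp [pvPiece, h]

-- B's fold preserves the buffer length
theorem pvLenPres (w : List Char) :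
    ∀ (idxs : List Int) (b : List (List Char)),
      (idxs.foldl (pvPatch w) b).length = b.length := by
  intro idxs
  induction idxs with
  | nil => intro b; rfl
  | cons a t ih =>
    intro b
    simp only [List.foldl_cons, ih, pvPatch]
    split <;> simp

-- B's fold, elementwise: in-range positions hit by some index carry the letter
theorem pvElem (w : List Char) :
    ∀ (idxs : List Int) (b : List (List Char)) (i : Nat)
      (hb : b.length = w.length) (hi : i < w.length),
      (idxs.foldl (pvPatch w) b)[i]'(by rw [pvLenPres, hb]; exact hi)
      = if (i : Int) ∈ idxs then [w.getD i ' '] else b[i]'(hb ▸ hi) := by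
  intro idxs
  induction idxs with
  | nil => intro b i hb hi; simp
  | cons a t ih =>
    intro b i hb hi
    simp only [List.foldl_cons]
    have hlen : (pvPatch w b a).length = w.length := by
      simp only [pvPatch]; split <;> simp [hb]
    rw [ih (pvPatch w b a) i hlen hi]
    by_cases hr : (i : Int) ∈ t
    · simp [hr, List.mem_cons]
    · by_cases ha : a = (i : Int)
      · have hrange : 0 ≤ a ∧ a < (w.length : Int) := by
          constructor <;> omega
        have htn : a.toNat = i := by omega
        simp only [pvPatch, if_pos hrange, htn]
        simp [hr, List.mem_cons, ha, List.getElem_set_self]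
      · have hmem : ¬ ((i : Int) ∈ a :: t) := by
          simp only [List.mem_cons, hr, or_false]
          intro h; exact ha h.symm
        rw [if_neg hmem, if_neg hr]
        simp only [pvPatch]
        split
        · next hrg =>
          have hne : a.toNat ≠ i := by omega
          exact List.getElem_set_ne hne _
        · rfl

theorem pvMain (word : String) (indexes : List Int) (placeholder : String) :
    getfinal word indexes placeholder = getfinal_alt word indexes placeholder := by
  unfold getfinal getfinal_alt
  rw [pvFoldA]
  congr 1
  simp only [List.nil_append]
  congr 1
  apply List.ext_getElem
  · simp [pvLenPres]
  · intro i h1 h2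
    have hi : i < word.toList.length := by simpa using h1
    rw [List.getElem_map]
    rw [pvElem word.toList indexes (List.replicate word.toList.length placeholder.toList) i (by simp) hi]
    simp [pvPiece, List.getElem_replicate]

-- ===== VERDICT (by name: the statement is the Claim_ definition above) =====
theorem getfinal_spec : Claim_equal_getfinal := by
  intro word indexes placeholder _
  unfold Spec_getfinal
  exact pvMain word indexes placeholder
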